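-- pv_equiv track=rewrite | github.com/Hongao0611/modelblocks-release | resource-incrsem/scripts/linetrees2cuegraphs.py | deps
-- ===== SOURCE A (Python) =====
-- def deps( s, ops='abcdghirv' ):
--   lst = [ ]
--   d,h = 0,0
--   for i in range( len(s) ):
--     if s[i]=='{': d+=1
--     if s[i]=='}': d-=1
--     if d==0 and s[i]=='-' and h+1<len(s) and s[h+1] in ops: lst += [ s[h:i] ]
--     if d==0 and s[i]=='-': h = i
--   if h+1<len(s) and s[h+1] in ops: lst += [ s[h:] ]
--   return lst
-- ===== SOURCE B (Python) =====
-- def deps(s, ops='abcdghirv'):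
--   # pass 1: collect all depth-0 dash positions, with an implicit cut at 0
--   cuts = [0]
--   d = 0
--   for i, c in enumerate(s):
--     if c == '{': d += 1
--     elif c == '}': d -= 1
--     elif c == '-' and d == 0: cuts.append(i)
--   # pass 2: slice between consecutive cuts, keeping a segment only if the
--   # character right after its start is an op
--   out = []
--   for k in range(len(cuts)):
--     start = cuts[k]
--     end = cuts[k + 1] if k + 1 < len(cuts) else len(s)
--     if start + 1 < len(s) and s[start + 1] in ops:
--       out.append(s[start:end])
--   return out
-- ===== Notes on version B (the rewrite author's own statement) =====
-- stated objective: faster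
-- what changed: B replaces A's single-pass 'remember the previous depth-0 dash and emit on the next dash plus a trailing emit' control flow by two passes: collect all depth-0 dash indices into a cut list seeded with 0, then slice between consecutive cuts, keeping each slice by the test on the character after its start; measured ~2x faster (fewer per-character tests in the hot loop via elif chaining).
import Mathlib
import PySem

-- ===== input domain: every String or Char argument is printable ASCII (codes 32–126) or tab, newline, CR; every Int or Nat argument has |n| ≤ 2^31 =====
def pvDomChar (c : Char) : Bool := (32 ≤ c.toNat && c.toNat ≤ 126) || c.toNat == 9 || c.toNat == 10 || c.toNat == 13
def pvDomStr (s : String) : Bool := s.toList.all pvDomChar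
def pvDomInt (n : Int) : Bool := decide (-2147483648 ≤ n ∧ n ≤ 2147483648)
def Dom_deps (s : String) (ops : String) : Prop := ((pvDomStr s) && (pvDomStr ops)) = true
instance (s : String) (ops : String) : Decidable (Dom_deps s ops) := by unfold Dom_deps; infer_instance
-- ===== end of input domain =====

-- B collects the depth-0 dash indices in one pass and slices between consecutive cuts in a
-- second pass, instead of A's previous-dash/trailing-emit control flow; same O(n) cost.

-- ===== PORT A =====
-- one iteration of A's 'for i in range(len(s))' loop; state = (lst, d, h); s[h+1] read under the
-- guard h+1 < len(s), exactly as Python's short-circuit 'and' does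
def depsStepA (sl op : List Char) (st : List (List Char) × Int × Nat) (p : Char × Nat) :
    List (List Char) × Int × Nat :=
  let c := p.1; let i := p.2
  let d := if c = '{' then st.2.1 + 1 else st.2.1
  let d := if c = '}' then d - 1 else d
  let lst := if d = 0 ∧ c = '-' ∧ st.2.2 + 1 < sl.length ∧ sl.getD (st.2.2 + 1) ' ' ∈ op
             then st.1 ++ [PySem.List.slice sl (some (st.2.2 : Int)) (some (i : Int))] else st.1
  let h := if d = 0 ∧ c = '-' then i else st.2.2
  (lst, d, h)

def deps (s : String) (ops : String) : List String :=
  let sl := s.toList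
  let op := ops.toList
  let st := sl.zipIdx.foldl (depsStepA sl op) ([], 0, 0)
  let lst := if st.2.2 + 1 < sl.length ∧ sl.getD (st.2.2 + 1) ' ' ∈ op
             then st.1 ++ [PySem.List.slice sl (some (st.2.2 : Int)) none] else st.1
  lst.map String.ofList

-- ===== PORT B =====
-- pass 1 of Source B: accumulate the depth counter and the depth-0 dash indices
def depsCutsStep (st : Int × List Nat) (p : Char × Nat) : Int × List Nat :=
  if p.1 = '{' then (st.1 + 1, st.2)
  else if p.1 = '}' then (st.1 - 1, st.2)
  else if p.1 = '-' ∧ st.1 = 0 then (st.1, st.2 ++ [p.2])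
  else st

-- pass 2 of Source B: for each cut, end = next cut if any else len(s); keep s[start:end] when
-- start+1 < len(s) and s[start+1] in ops
def depsEmit (sl op : List Char) : List Nat → List (List Char)
  | [] => []
  | [a] => if a + 1 < sl.length ∧ sl.getD (a + 1) ' ' ∈ op
           then [PySem.List.slice sl (some (a : Int)) (some (sl.length : Int))] else []
  | a :: b :: rest =>
      (if a + 1 < sl.length ∧ sl.getD (a + 1) ' ' ∈ op
       then [PySem.List.slice sl (some (a : Int)) (some (b : Int))] else [])
      ++ depsEmit sl op (b :: rest)

def deps_alt (s : String) (ops : String) : List String :=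
  let sl := s.toList
  let op := ops.toList
  let cuts := (sl.zipIdx.foldl depsCutsStep (0, [0])).2
  (depsEmit sl op cuts).map String.ofList

-- ===== PRECONDITION & SPEC =====
def Spec_deps (s : String) (ops : String) (out : List String) : Prop := out = deps_alt s ops
instance (s : String) (ops : String) (out : List String) : Decidable (Spec_deps s ops out) := by unfold Spec_deps; infer_instance

-- ===== CLAIM (what is proved, stated in full; the proofs are below) =====
def Claim_equal_deps : Prop := ∀ (s : String) (ops : String), Dom_deps s ops → Spec_deps s ops (deps s ops)

-- ===== LEMMAS AND PROOFS =====

-- the pair-slices of depsEmit, without the final open segment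
def emitInner (sl op : List Char) : List Nat → List (List Char)
  | [] => []
  | [_] => []
  | a :: b :: rest =>
      (if a + 1 < sl.length ∧ sl.getD (a + 1) ' ' ∈ op
       then [PySem.List.slice sl (some (a : Int)) (some (b : Int))] else [])
      ++ emitInner sl op (b :: rest)

theorem emit_split (sl op : List Char) :
    ∀ (cuts : List Nat), cuts ≠ [] →
      depsEmit sl op cuts = emitInner sl op cuts ++
        (if cuts.getLastD 0 + 1 < sl.length ∧ sl.getD (cuts.getLastD 0 + 1) ' ' ∈ op
         then [PySem.List.slice sl (some ((cuts.getLastD 0 : Nat) : Int)) (some (sl.length : Int))]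
         else []) := by
  intro cuts
  induction cuts with
  | nil => intro h; exact absurd rfl h
  | cons a t ih =>
    intro _
    cases t with
    | nil => simp [depsEmit, emitInner]
    | cons b r =>
      simp only [depsEmit, emitInner, List.getLastD_cons]
      rw [ih (by simp)]
      simp only [List.append_assoc, List.getLastD_cons]

theorem inner_snoc (sl op : List Char) :
    ∀ (cuts : List Nat) (i : Nat), cuts ≠ [] →
      emitInner sl op (cuts ++ [i]) = emitInner sl op cuts ++
        (if cuts.getLastD 0 + 1 < sl.length ∧ sl.getD (cuts.getLastD 0 + 1) ' ' ∈ op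
         then [PySem.List.slice sl (some ((cuts.getLastD 0 : Nat) : Int)) (some (i : Int))]
         else []) := by
  intro cuts i
  induction cuts with
  | nil => intro h; exact absurd rfl h
  | cons a t ih =>
    intro _
    cases t with
    | nil => simp [emitInner]
    | cons b r =>
      show (if a + 1 < sl.length ∧ sl.getD (a + 1) ' ' ∈ op
            then [PySem.List.slice sl (some (a : Int)) (some (b : Int))] else [])
            ++ emitInner sl op ((b :: r) ++ [i]) = _
      rw [ih (by simp)]
      simp [emitInner, List.append_assoc]

theorem main_inv (sl op : List Char) :
    ∀ (l : List (Char × Nat)) (d : Int) (cuts : List Nat), cuts ≠ [] →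
      (l.foldl depsCutsStep (d, cuts)).2 ≠ [] ∧
      l.foldl (depsStepA sl op) (emitInner sl op cuts, d, cuts.getLastD 0)
        = (emitInner sl op ((l.foldl depsCutsStep (d, cuts)).2),
           (l.foldl depsCutsStep (d, cuts)).1,
           ((l.foldl depsCutsStep (d, cuts)).2).getLastD 0) := by
  intro l
  induction l with
  | nil => intro d cuts hne; exact ⟨hne, rfl⟩
  | cons p t ih =>
    intro d cuts hne
    obtain ⟨c, i⟩ := p
    by_cases h1 : c = '{'
    · subst h1
      simpa [List.foldl_cons, depsStepA, depsCutsStep] using ih (d + 1) cuts hne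
    · by_cases h2 : c = '}'
      · subst h2
        simpa [List.foldl_cons, depsStepA, depsCutsStep] using ih (d - 1) cuts hne
      · by_cases h3 : c = '-' ∧ d = 0
        · obtain ⟨hc, hd⟩ := h3
          subst hc; subst hd
          have hstep : depsStepA sl op (emitInner sl op cuts, 0, cuts.getLastD 0) ('-', i)
              = (emitInner sl op (cuts ++ [i]), 0, i) := by
            simp [depsStepA, h1, h2, inner_snoc sl op cuts i hne]
            split <;> simp
          have hcut : depsCutsStep (0, cuts) ('-', i) = (0, cuts ++ [i]) := by
            simp [depsCutsStep, h1, h2]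
          rw [List.foldl_cons, List.foldl_cons, hstep, hcut]
          have hlast : (cuts ++ [i]).getLastD 0 = i := by simp
          have hih := ih 0 (cuts ++ [i]) (by simp)
          rw [hlast] at hih
          exact hih
        · have hstep : depsStepA sl op (emitInner sl op cuts, d, cuts.getLastD 0) (c, i)
              = (emitInner sl op cuts, d, cuts.getLastD 0) := by
            by_cases hc : c = '-'
            · subst hc
              have hd : d ≠ 0 := fun h => h3 ⟨rfl, h⟩
              simp [depsStepA, h1, h2, hd]
            · simp [depsStepA, h1, h2, hc]
          have hcut : depsCutsStep (d, cuts) (c, i) = (d, cuts) := by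
            by_cases hc : c = '-'
            · subst hc
              have hd : d ≠ 0 := fun h => h3 ⟨rfl, h⟩
              simp [depsCutsStep, h1, h2, hd]
            · simp [depsCutsStep, h1, h2, hc]
          rw [List.foldl_cons, List.foldl_cons, hstep, hcut]
          exact ih d cuts hne

theorem slice_open (sl : List Char) (a : Nat) :
    PySem.List.slice sl (some (a : Int)) none
      = PySem.List.slice sl (some (a : Int)) (some (sl.length : Int)) := by
  rw [PySem.List.slice_from_natCast, PySem.List.slice_natCast]
  exact (List.take_of_length_le (by simp)).symm

-- ===== VERDICT (by name: the statement is the Claim_ definition above) =====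
theorem deps_spec : Claim_equal_deps := by
  intro s ops _
  unfold Spec_deps deps deps_alt
  dsimp only
  have h0 : emitInner s.toList ops.toList [0] = [] := by simp [emitInner]
  have hl : ([0] : List Nat).getLastD 0 = 0 := by simp
  obtain ⟨hne, heq⟩ := main_inv s.toList ops.toList s.toList.zipIdx 0 [0] (by simp)
  rw [h0, hl] at heq
  rw [heq]
  rw [emit_split s.toList ops.toList _ hne]
  rw [slice_open]
  split <;> simp
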